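-- pv_equiv track=rewrite | github.com/jyu197/comp_sci_101 | apt8/EmailsCourse.py | emailsLargest
-- ===== SOURCE A (Python) =====
-- def emailsLargest(courses):
--     sizes = {}
--     for course in sorted(courses):
--         name = course.split(":")[0]
--         if name not in sizes:
--             sizes[name] = 0
--         else:
--             sizes[name] += 1
--     largest = max(sorted(sizes), key = sizes.get)
--     emails = []
--     for course in sorted(courses):
--         data = course.split(":")
--         if data[0] == largest:
--             emails.append(data[2])
--     return " ".join(emails)
-- ===== SOURCE B (Python) =====
-- def emailsLargest(courses):
--     groups = {}
--     for course in sorted(courses):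
--         groups.setdefault(course.split(":")[0], []).append(course)
--     largest = max(sorted(groups), key=lambda n: len(groups[n]))
--     return " ".join(c.split(":")[2] for c in groups[largest])
-- ===== Notes on version B (the rewrite author's own statement) =====
-- stated objective: simpler
-- what changed: A scans sorted(courses) twice (first to build a count dict, then to re-split every course and filter the winner); B groups the course strings by name in a single pass and reads the winning group's emails directly, so the second full scan and the separate count dict disappear.
-- outside the precondition, e.g. on emailsLargest([]): A raises ValueError, B raises ValueError
import Mathlib
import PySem

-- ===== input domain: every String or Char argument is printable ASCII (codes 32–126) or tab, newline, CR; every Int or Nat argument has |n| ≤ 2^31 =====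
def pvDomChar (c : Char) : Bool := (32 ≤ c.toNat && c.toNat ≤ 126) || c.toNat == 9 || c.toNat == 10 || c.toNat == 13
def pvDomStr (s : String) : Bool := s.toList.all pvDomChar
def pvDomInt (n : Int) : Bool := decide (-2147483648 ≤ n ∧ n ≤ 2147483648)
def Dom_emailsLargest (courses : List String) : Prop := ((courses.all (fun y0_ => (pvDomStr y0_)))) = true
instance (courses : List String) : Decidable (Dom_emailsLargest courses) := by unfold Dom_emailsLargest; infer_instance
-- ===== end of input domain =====

-- B groups the sorted course strings by name in one pass and reads the winning group's
-- emails directly, instead of A's two full scans (count dict, then re-split-and-filter).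


-- ===== PORT A =====
-- course.split(":") is never empty, so [0] never raises and '.getD ""' on it is exact;
-- data[2] raises IndexError on courses with fewer than 3 fields — Pre_ excludes those.
def emailsLargest (courses : List String) : String :=
  let sortedC := PySem.List.sorted courses (fun s => s) false
  let sizes : PySem.Dict String Int := sortedC.foldl (fun d course =>
    let name := (PySem.List.pyGet? (((PySem.Str.split? course ":").getD [])) 0).getD ""
    if d.contains name = false then d.insert name 0 else d.modify name 0 (· + 1)) PySem.Dict.empty
  -- max(sorted(sizes), key=sizes.get); courses ≠ [] (Pre_) so max never sees an empty list
  let largest := (PySem.List.max? (PySem.List.sorted sizes.keys (fun s => s) false)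
                    (fun n => sizes.getD n 0)).getD ""
  let emails := sortedC.foldl (fun acc course =>
    let data := ((PySem.Str.split? course ":").getD [])
    if (PySem.List.pyGet? data 0).getD "" = largest
      then acc ++ [(PySem.List.pyGet? data 2).getD ""] else acc) []
  PySem.Str.join " " emails

-- ===== PORT B =====
-- groups.setdefault(name, []).append(course) is d[name] = d.get(name, []) + [course], i.e. Dict.modify
def emailsLargest_alt (courses : List String) : String :=
  let groups : PySem.Dict String (List String) :=
    (PySem.List.sorted courses (fun s => s) false).foldl (fun d course =>
      d.modify ((PySem.List.pyGet? (((PySem.Str.split? course ":").getD [])) 0).getD "") [] (· ++ [course]))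
      PySem.Dict.empty
  let largest := (PySem.List.max? (PySem.List.sorted groups.keys (fun s => s) false)
                    (fun n => ((groups.getD n []).length : Int))).getD ""
  PySem.Str.join " " ((groups.getD largest []).map
    (fun c => (PySem.List.pyGet? (((PySem.Str.split? c ":").getD [])) 2).getD ""))

-- ===== PRECONDITION & SPEC =====
-- the course name, course.split(":")[0] (split(":") is never empty, so this never raises)
def pvName (c : String) : String := (PySem.List.pyGet? (((PySem.Str.split? c ":").getD [])) 0).getD ""

-- Pre_ excludes exactly the inputs where A raises: the empty list (ValueError from max([]))
-- and inputs whose winning name (most frequent, alphabetically least on ties) labels some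
-- course with fewer than 3 ':'-fields (IndexError from data[2]).
def Pre_emailsLargest (courses : List String) : Prop :=
  courses ≠ [] ∧ ∃ w ∈ courses.map pvName,
    (∀ m ∈ courses.map pvName,
       (courses.map pvName).count m < (courses.map pvName).count w ∨
       ((courses.map pvName).count m = (courses.map pvName).count w ∧ w.toList ≤ m.toList)) ∧
    ∀ c ∈ courses, pvName c = w → 3 ≤ (((PySem.Str.split? c ":").getD [])).length
instance (courses : List String) : Decidable (Pre_emailsLargest courses) := by
  unfold Pre_emailsLargest; infer_instance
def pvWitness_emailsLargest : List String := ["a:b:c"]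
def Spec_emailsLargest (courses : List String) (out : String) : Prop := out = emailsLargest_alt courses
instance (courses : List String) (out : String) : Decidable (Spec_emailsLargest courses out) := by unfold Spec_emailsLargest; infer_instance

-- ===== CLAIM (what is proved, stated in full; the proofs are below) =====
def Claim_equal_emailsLargest : Prop := ∀ (courses : List String), Dom_emailsLargest courses → Pre_emailsLargest courses → Spec_emailsLargest courses (emailsLargest courses)

-- ===== LEMMAS AND PROOFS =====

-- A's counting loop: keys in first-occurrence order
lemma foldA_keys (l : List String) (d : PySem.Dict String Int) :
    (l.foldl (fun d course =>
      if d.contains (pvName course) = false then d.insert (pvName course) 0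
      else d.modify (pvName course) 0 (· + 1)) d).keys
    = PySem.Set.update d.keys (l.map pvName) := by
  induction l generalizing d with
  | nil => simp [PySem.Set.update]
  | cons c t ih =>
    simp only [List.foldl_cons, List.map_cons, PySem.Set.update_cons]
    by_cases hc : d.contains (pvName c) = false
    · rw [if_pos hc, ih, PySem.Dict.keys_insert_of_not_contains _ _ hc,
        PySem.Set.add_of_not_mem (fun hm =>
          absurd ((PySem.Dict.contains_iff_mem_keys _ _).2 hm) (by simp [hc]))]
    · have hc' : d.contains (pvName c) = true := by simpa using hc
      rw [if_neg hc, ih, PySem.Dict.keys_modify,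
        PySem.Dict.keys_insert_of_contains _ _ hc',
        PySem.Set.add_of_mem ((PySem.Dict.contains_iff_mem_keys _ _).1 hc')]

-- A's counting loop: the stored count is (#occurrences − 1) for fresh keys
lemma foldA_getD (l : List String) (d : PySem.Dict String Int) (n : String) :
    (l.foldl (fun d course =>
      if d.contains (pvName course) = false then d.insert (pvName course) 0
      else d.modify (pvName course) 0 (· + 1)) d).getD n 0
    = if d.contains n then d.getD n 0 + ((l.map pvName).count n : Int)
      else if n ∈ l.map pvName then ((l.map pvName).count n : Int) - 1 else 0 := by
  induction l generalizing d with
  | nil =>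
    by_cases h : d.contains n
    · simp [h]
    · simp [h, PySem.Dict.getD_of_not_contains _ _ (by simpa using h)]
  | cons c t ih =>
    simp only [List.foldl_cons]
    by_cases hc : d.contains (pvName c) = false
    · rw [if_pos hc, ih]
      by_cases hn : n = pvName c
      · subst hn
        simp only [PySem.Dict.contains_insert, PySem.Dict.getD_insert, List.map_cons,
          List.count_cons, List.mem_cons, beq_self_eq_true, if_pos rfl, true_or, if_true,
          BEq.rfl, Bool.true_or, hc]
        push_cast
        omega
      · simp only [PySem.Dict.contains_insert, PySem.Dict.getD_insert, List.map_cons,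
          List.count_cons, List.mem_cons, hn, if_false, if_neg hn,
          beq_iff_eq, Ne.symm hn, decide_false, Bool.false_or]
        simp [hn]
    · have hc' : d.contains (pvName c) = true := by simpa using hc
      rw [if_neg hc, ih]
      by_cases hn : n = pvName c
      · subst hn
        simp only [PySem.Dict.contains_modify, PySem.Dict.getD_modify, List.map_cons,
          List.count_cons, BEq.rfl, Bool.true_or, hc', if_pos rfl, beq_self_eq_true]
        push_cast
        omega
      · simp only [PySem.Dict.contains_modify, PySem.Dict.getD_modify, List.map_cons,
          List.count_cons, if_neg hn, beq_iff_eq, Ne.symm hn, decide_false, Bool.false_or]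
        simp [hn]

-- B's grouping loop: the stored group is the in-order sublist with that name
lemma foldB_getD (l : List String) (d : PySem.Dict String (List String)) (n : String) :
    (l.foldl (fun d course => d.modify (pvName course) [] (· ++ [course])) d).getD n []
    = d.getD n [] ++ l.filter (fun c => pvName c == n) := by
  induction l generalizing d with
  | nil => simp
  | cons c t ih =>
    simp only [List.foldl_cons, List.filter_cons]
    rw [ih]
    by_cases hn : pvName c = n
    · simp [PySem.Dict.getD_modify, hn]
    · simp [PySem.Dict.getD_modify, hn, Ne.symm hn]

-- first-argmax is invariant under shifting the key by 1
lemma max?_shift_aux (l : List String) (f g : String → Int)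
    (h : ∀ x ∈ l, g x = f x + 1) :
    ∀ acc : Option String, (∀ m, acc = some m → g m = f m + 1) →
      l.foldl (fun acc x => acc.elim (some x)
        (fun m => if f m < f x then some x else some m)) acc
      = l.foldl (fun acc x => acc.elim (some x)
        (fun m => if g m < g x then some x else some m)) acc := by
  induction l with
  | nil => intro acc _; rfl
  | cons c t ih =>
    intro acc hacc
    have hc : g c = f c + 1 := h c (by simp)
    have ht : ∀ x ∈ t, g x = f x + 1 := fun x hx => h x (List.mem_cons_of_mem _ hx)
    simp only [List.foldl_cons]
    cases acc with
    | none => exact ih ht (some c) (by intro m hm; cases hm; exact hc)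
    | some m =>
      have hm : g m = f m + 1 := hacc m rfl
      simp only [Option.elim_some]
      by_cases hlt : f m < f c
      · rw [if_pos hlt, if_pos (show g m < g c by omega)]
        exact ih ht (some c) (by intro x hx; cases hx; exact hc)
      · rw [if_neg hlt, if_neg (show ¬ g m < g c by omega)]
        exact ih ht (some m) (by intro x hx; cases hx; exact hm)

lemma max?_shift (l : List String) (f g : String → Int)
    (h : ∀ x ∈ l, g x = f x + 1) :
    PySem.List.max? l f = PySem.List.max? l g := by
  have e : ∀ k : String → Int, PySem.List.max? l k
      = l.foldl (fun acc x => acc.elim (some x)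
          (fun m => if k m < k x then some x else some m)) none := by
    intro k
    unfold PySem.List.max?
    congr 1
    funext acc x
    cases acc <;> rfl
  rw [e f, e g]
  exact max?_shift_aux l f g h none (by intro m hm; cases hm)

-- emails loop of A is a filter-map
lemma emailsA_eq (l : List String) (largest : String) :
    l.foldl (fun acc course =>
      if pvName course = largest
        then acc ++ [(PySem.List.pyGet? (((PySem.Str.split? course ":").getD [])) 2).getD ""] else acc) []
    = (l.filter (fun c => pvName c == largest)).map
        (fun c => (PySem.List.pyGet? (((PySem.Str.split? c ":").getD [])) 2).getD "") := by
  have hfn : (fun (acc : List String) course =>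
      if pvName course = largest
        then acc ++ [(PySem.List.pyGet? (((PySem.Str.split? course ":").getD [])) 2).getD ""] else acc)
    = (fun acc c => if (fun c => pvName c == largest) c = true
        then acc ++ [(fun c => (PySem.List.pyGet? (((PySem.Str.split? c ":").getD [])) 2).getD "") c] else acc) := by
    funext acc c; simp
  rw [hfn, PySem.List.foldl_append_if]
  simp

-- ===== VERDICT (by name: the statement is the Claim_ definition above) =====
theorem emailsLargest_spec : Claim_equal_emailsLargest := by
  intro courses _ _
  unfold Spec_emailsLargest emailsLargest emailsLargest_alt
  have hpv : ∀ c : String,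
      (PySem.List.pyGet? (((PySem.Str.split? c ":").getD [])) 0).getD "" = pvName c :=
    fun _ => rfl
  simp only [hpv]
  simp only [foldA_keys, PySem.Dict.keys_foldl_modify_key, PySem.Dict.keys_empty,
    PySem.Set.update_nil_left]
  rw [max?_shift _ _ (fun n => ((((PySem.List.sorted courses (fun s => s) false).foldl
        (fun d course => d.modify (pvName course) [] (· ++ [course]))
        PySem.Dict.empty).getD n []).length : Int)) ?_]
  · rw [emailsA_eq, foldB_getD]
    simp [PySem.Dict.getD_empty]
  · intro n hn
    have hnK : n ∈ (PySem.List.sorted courses (fun s => s) false).map pvName := by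
      have h1 := (PySem.List.mem_sorted _ _ _ _).1 hn
      exact (PySem.Set.mem_ofList _ _).1 h1
    dsimp only
    rw [foldB_getD, foldA_getD]
    simp only [PySem.Dict.contains_empty, PySem.Dict.getD_empty, if_false, hnK, if_true,
      List.nil_append, Bool.false_eq_true]
    have hcnt : ((PySem.List.sorted courses (fun s => s) false).filter
        (fun c => pvName c == n)).length
        = ((PySem.List.sorted courses (fun s => s) false).map pvName).count n := by
      rw [List.count_eq_countP, List.countP_map]
      rw [← List.countP_eq_length_filter]
      rfl
    rw [hcnt]
    omega
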